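-- pv_equiv track=rewrite | github.com/Braxxx1/Python_Files | logger.py | enumerate_2_0
-- ===== SOURCE A (Python) =====
-- def enumerate_2_0(data):
--     data_number = 0
--     data_dict = {}
--     for i in data:
--         if i == "\n":
--             data_number += 1
--         elif data_number not in data_dict:
--             data_dict[data_number] = [i]
--         else:
--             data_dict[data_number].append(i)
--     return data_dict
-- ===== SOURCE B (Python) =====
-- def enumerate_2_0(data):
--     return {i: list(part) for i, part in enumerate(data.split("\n")) if part}
-- ===== Notes on version B (the rewrite author's own statement) =====
-- stated objective: simpler
-- what changed: B delegates the scanning entirely to str.split('\n') and builds the dict with one enumerate-filter comprehension over the parts, instead of A's explicit character loop maintaining a newline counter and a dict with membership tests and per-key insert/append.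
import Mathlib
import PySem

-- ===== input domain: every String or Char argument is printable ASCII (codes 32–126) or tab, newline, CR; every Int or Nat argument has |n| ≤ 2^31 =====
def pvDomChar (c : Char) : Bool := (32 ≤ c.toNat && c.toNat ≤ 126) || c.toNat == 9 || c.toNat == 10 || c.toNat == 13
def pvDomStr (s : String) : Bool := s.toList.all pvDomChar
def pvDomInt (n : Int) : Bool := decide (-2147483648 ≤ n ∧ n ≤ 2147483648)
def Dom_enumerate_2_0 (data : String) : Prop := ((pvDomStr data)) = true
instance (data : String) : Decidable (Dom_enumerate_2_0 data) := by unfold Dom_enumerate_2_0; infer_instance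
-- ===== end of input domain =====

-- B replaces A's character loop (newline counter + dict membership/insert/append) by
-- str.split("\n") followed by one enumerate-filter comprehension (objective: simpler).

-- ===== PORT A =====
-- one loop step of A: bump the counter on '\n', else insert/append under the current counter
def pvStepA (st : Int × PySem.Dict Int (List String)) (i : Char) : Int × PySem.Dict Int (List String) :=
  if i = '\n' then (st.1 + 1, st.2)
  else if st.2.contains st.1 = false then (st.1, st.2.insert st.1 [String.ofList [i]])
  else (st.1, st.2.modify st.1 [] (fun l => l ++ [String.ofList [i]]))

def enumerate_2_0 (data : String) : List (Int × List String) :=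
  (data.toList.foldl pvStepA (0, PySem.Dict.empty)).2.items

-- ===== PORT B =====
-- data.split("\n") with the literal nonempty separator is exactly PySem.Chars.splitOn;
-- the comprehension filters empty parts and turns each kept part into its list of 1-char strings
def enumerate_2_0_alt (data : String) : List (Int × List String) :=
  (PySem.List.enumerate (PySem.Chars.splitOn data.toList ['\n'])).filterMap
    (fun p => if p.2.isEmpty then none
              else some (p.1, p.2.map (fun c => String.ofList [c])))

-- ===== PRECONDITION & SPEC =====
def Spec_enumerate_2_0 (data : String) (out : List (Int × List String)) : Prop := out = enumerate_2_0_alt data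
instance (data : String) (out : List (Int × List String)) : Decidable (Spec_enumerate_2_0 data out) := by unfold Spec_enumerate_2_0; infer_instance

-- ===== CLAIM (what is proved, stated in full; the proofs are below) =====
def Claim_equal_enumerate_2_0 : Prop := ∀ (data : String), Dom_enumerate_2_0 data → Spec_enumerate_2_0 data (enumerate_2_0 data)

-- ===== LEMMAS AND PROOFS =====

-- the block list built so far, as in the reviewer's staged reading: used only in the proofs
def pvStepB (blocks : List (List String)) (i : Char) : List (List String) :=
  if i = '\n' then blocks ++ [[]]
  else blocks.dropLast ++ [PySem.List.pyGetD blocks (-1) [] ++ [String.ofList [i]]]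

-- the dict A has built after seeing blocks `bs` so far: nonempty blocks keyed by position (from i)
def pvEnc (i : Int) : List (List String) → List (Int × List String)
  | [] => []
  | b :: bs => (if b.isEmpty then [] else [(i, b)]) ++ pvEnc (i + 1) bs

-- splitOn ['\n'] written as a plain structural recursion (cur is the current piece, reversed)
def pvPieces (cur : List Char) : List Char → List (List Char)
  | [] => [cur.reverse]
  | c :: rest => if c = '\n' then cur.reverse :: pvPieces [] rest else pvPieces (c :: cur) rest

-- the blocks that remain to be produced from pending block b and remaining characters
def pvToBlocks (b : List String) : List Char → List (List String)
  | [] => [b]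
  | c :: rest => if c = '\n' then b :: pvToBlocks [] rest
                 else pvToBlocks (b ++ [String.ofList [c]]) rest

theorem pv_go_eq (l : List Char) : ∀ (fuel : Nat) (cur : List Char) (acc : List (List Char)),
    l.length ≤ fuel →
    PySem.Chars.splitOn.go ['\n'] fuel l cur acc = acc.reverse ++ pvPieces cur l := by
  induction l with
  | nil =>
    intro fuel cur acc _
    cases fuel <;> simp [PySem.Chars.splitOn.go, pvPieces]
  | cons c rest ih =>
    intro fuel cur acc hf
    cases fuel with
    | zero => simp at hf
    | succ f =>
      simp only [PySem.Chars.splitOn.go, List.isPrefixOf]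
      by_cases hc : c = '\n'
      · subst hc
        simp only [beq_self_eq_true, Bool.true_and, if_true, List.length_cons, List.drop_succ_cons]
        simp only [List.length_nil, List.drop_zero]
        rw [ih f [] (cur.reverse :: acc) (by simpa using Nat.lt_succ_iff.mp (by simpa using hf))]
        simp [pvPieces]
      · have : ('\n' == c) = false := by simpa using fun h => hc h.symm
        simp only [this, Bool.false_and]
        rw [ih f (c :: cur) acc (by simpa using Nat.lt_succ_iff.mp (by simpa using hf))]
        simp [pvPieces, hc]

theorem pv_splitOn_eq (cs : List Char) : PySem.Chars.splitOn cs ['\n'] = pvPieces [] cs := by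
  unfold PySem.Chars.splitOn
  rw [pv_go_eq cs (cs.length + 1) [] [] (by omega)]
  simp

theorem pv_pieces_toBlocks (cs : List Char) : ∀ (cur : List Char),
    (pvPieces cur cs).map (fun p => p.map (fun c => String.ofList [c]))
      = pvToBlocks (cur.reverse.map (fun c => String.ofList [c])) cs := by
  induction cs with
  | nil => intro cur; simp [pvPieces, pvToBlocks]
  | cons c rest ih =>
    intro cur
    by_cases hc : c = '\n'
    · simp [pvPieces, pvToBlocks, hc, ih]
    · simp [pvPieces, pvToBlocks, hc, ih (c :: cur)]

theorem pv_foldl_toBlocks (cs : List Char) : ∀ (bs : List (List String)) (b : List String),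
    cs.foldl pvStepB (bs ++ [b]) = bs ++ pvToBlocks b cs := by
  induction cs with
  | nil => intro bs b; simp [pvToBlocks]
  | cons c rest ih =>
    intro bs b
    by_cases hc : c = '\n'
    · have : pvStepB (bs ++ [b]) c = (bs ++ [b]) ++ [[]] := by simp [pvStepB, hc]
      rw [List.foldl_cons, this, ih (bs ++ [b]) []]
      simp [pvToBlocks, hc]
    · have : pvStepB (bs ++ [b]) c = bs ++ [b ++ [String.ofList [c]]] := by
        simp only [pvStepB, hc, if_false]
        rw [List.dropLast_concat, PySem.List.pyGetD_neg_one_append_singleton]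
      rw [List.foldl_cons, this, ih bs (b ++ [String.ofList [c]])]
      simp [pvToBlocks, hc]

theorem pv_filterMap_enc (ps : List (List Char)) : ∀ (i : Int),
    (PySem.List.enumerate ps i).filterMap
        (fun p => if p.2.isEmpty then none
                  else some (p.1, p.2.map (fun c => String.ofList [c])))
      = pvEnc i (ps.map (fun p => p.map (fun c => String.ofList [c]))) := by
  induction ps with
  | nil => intro i; simp [PySem.List.enumerate_nil, pvEnc]
  | cons p ps ih =>
    intro i
    rw [PySem.List.enumerate_cons, List.filterMap_cons]
    by_cases hp : p = []
    · subst hp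
      simp only [List.isEmpty_nil, if_true]
      rw [ih (i + 1)]
      simp [pvEnc]
    · have h1 : p.isEmpty = false := by simpa [List.isEmpty_iff] using hp
      simp only [h1, Bool.false_eq_true, if_false]
      rw [ih (i + 1)]
      have h2 : (p.map (fun c => String.ofList [c])).isEmpty = false := by
        simp [hp]
      simp [pvEnc, h2]

theorem pvEnc_append (bs : List (List String)) (b : List String) (i : Int) :
    pvEnc i (bs ++ [b]) = pvEnc i bs ++ (if b.isEmpty then [] else [(i + bs.length, b)]) := by
  induction bs generalizing i with
  | nil => simp [pvEnc]
  | cons x bs ih =>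
    simp only [List.cons_append, pvEnc, ih, List.length_cons, List.append_assoc]
    have : i + 1 + (bs.length : Int) = i + ((bs.length : Int) + 1) := by ring
    rw [this]
    push_cast
    ring_nf

theorem pvEnc_key_lt (bs : List (List String)) (i : Int) (p : Int × List String)
    (hp : p ∈ pvEnc i bs) : p.1 < i + bs.length := by
  induction bs generalizing i with
  | nil => simp [pvEnc] at hp
  | cons b bs ih =>
    simp only [pvEnc, List.mem_append] at hp
    rcases hp with h | h
    · split at h
      · simp at h
      · simp at h
        subst h
        simp only [List.length_cons]
        push_cast
        have : (0:Int) ≤ (bs.length : Int) := by positivity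
        omega
    · have := ih (i + 1) h
      simp only [List.length_cons]
      push_cast
      omega

theorem pv_contains_enc (l : List (Int × List String)) (n : Int)
    (h : ∀ p ∈ l, p.1 ≠ n) : (PySem.Dict.mk l).contains n = false := by
  simp only [PySem.Dict.contains, List.any_eq_false]
  intro p hp
  simpa using h p hp

theorem pv_get?_last (l : List (Int × List String)) (n : Int) (b : List String)
    (h : ∀ p ∈ l, p.1 ≠ n) : (PySem.Dict.mk (l ++ [(n, b)])).get? n = some b := by
  induction l with
  | nil => simp [PySem.Dict.get?_mk_cons]
  | cons p l ih =>
    rw [List.cons_append, PySem.Dict.get?_mk_cons]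
    have hne : p.1 ≠ n := h p (by simp)
    simp only [beq_iff_eq, hne, if_false]
    exact ih (fun q hq => h q (by simp [hq]))

theorem pv_map_keep (l : List (Int × List String)) (n : Int) (v : List String)
    (h : ∀ p ∈ l, p.1 ≠ n) :
    l.map (fun p => if (p.1 == n) = true then (n, v) else p) = l := by
  induction l with
  | nil => rfl
  | cons p l ih =>
    have hne : p.1 ≠ n := h p (by simp)
    rw [List.map_cons, if_neg (by simpa using hne), ih (fun q hq => h q (by simp [hq]))]

-- one step of A, tracked against one step of the block builder, with the invariant state
theorem pv_step (bs : List (List String)) (b : List String) (c : Char) :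
    ∃ bs' b', pvStepB (bs ++ [b]) c = bs' ++ [b'] ∧
      pvStepA ((bs.length : Int), PySem.Dict.mk (pvEnc 0 (bs ++ [b]))) c
        = ((bs'.length : Int), PySem.Dict.mk (pvEnc 0 (bs' ++ [b']))) := by
  have hkey : ∀ p ∈ pvEnc 0 bs, p.1 ≠ (bs.length : Int) := by
    intro p hp
    have := pvEnc_key_lt bs 0 p hp
    omega
  by_cases hc : c = '\n'
  · refine ⟨bs ++ [b], [], ?_, ?_⟩
    · simp [pvStepB, hc]
    · simp only [pvStepA, hc, if_true]
      refine Prod.ext ?_ ?_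
      · simp
      · apply PySem.Dict.ext
        rw [pvEnc_append (bs ++ [b]) [] 0]
        simp
  · have hB : pvStepB (bs ++ [b]) c = bs ++ [b ++ [String.ofList [c]]] := by
      simp only [pvStepB, hc, if_false]
      rw [List.dropLast_concat, PySem.List.pyGetD_neg_one_append_singleton]
    refine ⟨bs, b ++ [String.ofList [c]], hB, ?_⟩
    simp only [pvStepA, hc, if_false]
    by_cases hb : b = []
    · subst hb
      have henc : pvEnc 0 (bs ++ [([] : List String)]) = pvEnc 0 bs := by
        rw [pvEnc_append]; simp
      have hcont : (PySem.Dict.mk (pvEnc 0 (bs ++ [([] : List String)]))).contains (bs.length : Int) = false := by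
        rw [henc]; exact pv_contains_enc _ _ hkey
      simp only [hcont, if_true]
      refine Prod.ext rfl ?_
      apply PySem.Dict.ext
      rw [PySem.Dict.items_insert_of_not_contains _ _ hcont, henc,
        pvEnc_append bs ([] ++ [String.ofList [c]]) 0]
      simp
    · have henc : pvEnc 0 (bs ++ [b]) = pvEnc 0 bs ++ [((bs.length : Int), b)] := by
        rw [pvEnc_append]
        simp [List.isEmpty_iff, hb]
      have hget : (PySem.Dict.mk (pvEnc 0 (bs ++ [b]))).get? (bs.length : Int) = some b := by
        rw [henc]; exact pv_get?_last _ _ _ hkey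
      have hcont : (PySem.Dict.mk (pvEnc 0 (bs ++ [b]))).contains (bs.length : Int) = true := by
        rw [PySem.Dict.contains_eq_isSome_get?, hget]; rfl
      simp only [hcont, Bool.true_eq_false, if_false]
      refine Prod.ext rfl ?_
      apply PySem.Dict.ext
      simp only [PySem.Dict.modify]
      rw [PySem.Dict.getD_eq_get?_getD, hget]
      rw [PySem.Dict.items_insert_of_contains _ _ hcont, henc]
      rw [List.map_append, pv_map_keep _ _ _ hkey]
      rw [pvEnc_append bs (b ++ [String.ofList [c]]) 0]
      simp [List.isEmpty_iff]

theorem pv_loop (cs : List Char) : ∀ (bs : List (List String)) (b : List String),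
    cs.foldl pvStepA ((bs.length : Int), PySem.Dict.mk (pvEnc 0 (bs ++ [b])))
      = (((cs.foldl pvStepB (bs ++ [b])).length : Int) - 1,
         PySem.Dict.mk (pvEnc 0 (cs.foldl pvStepB (bs ++ [b])))) := by
  induction cs with
  | nil =>
    intro bs b
    simp
  | cons c cs ih =>
    intro bs b
    obtain ⟨bs', b', hB, hA⟩ := pv_step bs b c
    simp only [List.foldl_cons, hA, hB, ih bs' b']

theorem enumerate_2_0_eq (data : String) : enumerate_2_0 data = enumerate_2_0_alt data := by
  unfold enumerate_2_0 enumerate_2_0_alt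
  -- A's side equals pvEnc 0 of the block fold
  have h0 : (0 : Int) = (([] : List (List String)).length : Int) := by simp
  have hd : (PySem.Dict.empty : PySem.Dict Int (List String))
      = PySem.Dict.mk (pvEnc 0 ([] ++ [([] : List String)])) := by
    apply PySem.Dict.ext
    simp [PySem.Dict.empty, pvEnc]
  have hA : ((0 : Int), (PySem.Dict.empty : PySem.Dict Int (List String)))
      = ((([] : List (List String)).length : Int), PySem.Dict.mk (pvEnc 0 ([] ++ [([] : List String)]))) := by
    rw [← h0, ← hd]
  rw [hA, pv_loop data.toList [] []]
  -- B's side equals pvEnc 0 of the same block list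
  rw [pv_splitOn_eq, pv_filterMap_enc, pv_pieces_toBlocks]
  rw [pv_foldl_toBlocks data.toList [] []]
  simp

-- ===== VERDICT (by name: the statement is the Claim_ definition above) =====
theorem enumerate_2_0_spec : Claim_equal_enumerate_2_0 := by
  intro data _
  exact enumerate_2_0_eq data
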